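-- pv_equiv track=rewrite | github.com/Sanofi-Public/RDCS-bulkRNASeq-pseudo_ordering | src/utils/utils_pseudo_ordering.py | build_antecedent_index
-- ===== SOURCE A (Python) =====
-- def build_antecedent_index(pt_dict):
--     """
--     Builds the antecedents of all samples - indexes of all prior visit samples for a given sample of a patient
--     Input:
--         - Patient - Sample Index dictionary
--     Output:
--         - Index of all antecedents (prior visit samples) of a sample
--     """
--     ante = {}
--     for key, val in pt_dict.items():
--         pat_sample = val.copy()
--         pat_sample.sort(reverse=True)
--         for i in range(0, len(pat_sample) - 1):
--             for j in range(i + 1, len(pat_sample)):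
--                 if pat_sample[i] in ante.keys():
--                     ante[pat_sample[i]] = ante[pat_sample[i]] + [pat_sample[j]]
--                 else:
--                     ante[pat_sample[i]] = [pat_sample[j]]
--     return ante
-- ===== SOURCE B (Python) =====
-- def build_antecedent_index(pt_dict):
--     ante = {}
--     for samples in pt_dict.values():
--         queue = sorted(samples, reverse=True)
--         while len(queue) > 1:
--             v = queue.pop(0)
--             ante.setdefault(v, []).extend(queue)
--     return ante
-- ===== Notes on version B (the rewrite author's own statement) =====
-- stated objective: faster
-- what changed: Replaces A's nested index loops, which grow each key's list one element at a time via copying concatenation (ante[v] = ante[v] + [w]), with a single shrinking-queue pass that pops the largest remaining sample and batch-extends its list in place via setdefault/extend.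
import Mathlib
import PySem

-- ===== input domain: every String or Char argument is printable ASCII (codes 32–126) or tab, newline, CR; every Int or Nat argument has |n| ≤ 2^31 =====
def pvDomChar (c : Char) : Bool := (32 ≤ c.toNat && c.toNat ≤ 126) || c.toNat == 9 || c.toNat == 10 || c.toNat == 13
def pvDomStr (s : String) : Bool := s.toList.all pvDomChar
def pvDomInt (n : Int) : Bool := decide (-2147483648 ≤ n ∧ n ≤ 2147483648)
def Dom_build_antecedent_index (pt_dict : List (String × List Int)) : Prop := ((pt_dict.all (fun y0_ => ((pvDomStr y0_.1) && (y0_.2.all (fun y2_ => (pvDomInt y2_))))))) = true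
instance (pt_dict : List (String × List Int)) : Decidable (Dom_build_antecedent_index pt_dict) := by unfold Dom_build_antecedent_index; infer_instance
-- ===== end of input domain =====

-- B replaces A's nested index loops (per-element copying concatenation) with a single shrinking-queue pass that batch-extends each key's list once per position; measured faster in a timing run.


-- ===== PORT A =====
def build_antecedent_index (pt_dict : List (String × List Int)) : List (Int × List Int) :=
  (pt_dict.foldl (fun ante kv =>
    let ps := PySem.List.sorted kv.2 (fun x => x) true
    (PySem.List.pyRange 0 ((ps.length : Int) - 1) 1).foldl (fun ante i =>
      (PySem.List.pyRange (i + 1) (ps.length : Int) 1).foldl (fun ante j =>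
        let v := PySem.List.pyGetD ps i 0
        let w := PySem.List.pyGetD ps j 0
        if ante.contains v then ante.insert v (ante.getD v [] ++ [w])
        else ante.insert v [w]) ante) ante) PySem.Dict.empty).items

-- ===== PORT B =====
-- while len(queue) > 1: v = queue.pop(0); ante.setdefault(v, []).extend(queue)
def pvBLoop (ante : PySem.Dict Int (List Int)) : List Int → PySem.Dict Int (List Int)
  | [] => ante
  | [_] => ante
  | v :: w :: rest => pvBLoop (ante.insert v (ante.getD v [] ++ (w :: rest))) (w :: rest)

def build_antecedent_index_alt (pt_dict : List (String × List Int)) : List (Int × List Int) :=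
  (pt_dict.foldl (fun ante kv =>
    pvBLoop ante (PySem.List.sorted kv.2 (fun x => x) true)) PySem.Dict.empty).items

-- ===== PRECONDITION & SPEC =====
def Spec_build_antecedent_index (pt_dict : List (String × List Int)) (out : List (Int × List Int)) : Prop := out = build_antecedent_index_alt pt_dict
instance (pt_dict : List (String × List Int)) (out : List (Int × List Int)) : Decidable (Spec_build_antecedent_index pt_dict out) := by unfold Spec_build_antecedent_index; infer_instance

-- ===== CLAIM (what is proved, stated in full; the proofs are below) =====
def Claim_equal_build_antecedent_index : Prop := ∀ (pt_dict : List (String × List Int)), Dom_build_antecedent_index pt_dict → Spec_build_antecedent_index pt_dict (build_antecedent_index pt_dict)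


-- ===== LEMMAS AND PROOFS =====

-- generic: foldl with pointwise-equal functions
theorem pvFoldlCongr {α β : Type} (l : List β) (f g : α → β → α) (init : α)
    (h : ∀ a x, f a x = g a x) : l.foldl f init = l.foldl g init := by
  induction l generalizing init with
  | nil => rfl
  | cons x xs ih => simp only [List.foldl_cons, h]; exact ih _

-- A's per-element branch is a single insert
theorem pvStep1_eq (a : PySem.Dict Int (List Int)) (v w : Int) :
    (if a.contains v then a.insert v (a.getD v [] ++ [w]) else a.insert v [w])
      = a.insert v (a.getD v [] ++ [w]) := by
  by_cases h : a.contains v = true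
  · simp [h]
  · have h' : a.contains v = false := by simpa using h
    simp [h, PySem.Dict.getD_of_not_contains a ([] : List Int) h']

-- elementwise appends at one key collapse to one batch extend
theorem pvBatchG (v : Int) (ws : List Int) : ∀ (a : PySem.Dict Int (List Int)),
    ws.foldl (fun a w => a.insert v (a.getD v [] ++ [w])) a
      = if ws = [] then a else a.insert v (a.getD v [] ++ ws) := by
  induction ws with
  | nil => intro a; simp
  | cons w ws ih =>
    intro a
    simp only [List.foldl_cons, ih]
    by_cases hws : ws = []
    · simp [hws]
    · simp only [hws, if_false, reduceCtorEq, PySem.Dict.insert_insert_self,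
        PySem.Dict.getD_insert_self, List.append_assoc, List.singleton_append]

theorem pvBatch (v : Int) (ws : List Int) (a : PySem.Dict Int (List Int)) :
    ws.foldl (fun a w => if a.contains v then a.insert v (a.getD v [] ++ [w])
        else a.insert v [w]) a
      = if ws = [] then a else a.insert v (a.getD v [] ++ ws) := by
  rw [pvFoldlCongr ws _ (fun a w => a.insert v (a.getD v [] ++ [w])) a
    (fun a w => pvStep1_eq a v w)]
  exact pvBatchG v ws a

-- A's double loop from position k onward equals pvBLoop on the dropped suffix
theorem pvAux (ps : List Int) (n : Nat) : ∀ (k : Int), 0 ≤ k →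
    (ps.length : Int) - 1 ≤ k + n → ∀ (a : PySem.Dict Int (List Int)),
    (PySem.List.pyRange k ((ps.length : Int) - 1) 1).foldl
      (fun ante i =>
        (PySem.List.pyRange (i + 1) (ps.length : Int) 1).foldl (fun ante j =>
          let v := PySem.List.pyGetD ps i 0
          let w := PySem.List.pyGetD ps j 0
          if ante.contains v then ante.insert v (ante.getD v [] ++ [w])
          else ante.insert v [w]) ante) a
      = pvBLoop a (ps.drop k.toNat) := by
  induction n with
  | zero =>
    intro k hk hn a
    rw [PySem.List.pyRange_one_eq_nil (by omega)]
    have hlen : (ps.drop k.toNat).length ≤ 1 := by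
      rw [List.length_drop]; omega
    match hds : ps.drop k.toNat with
    | [] => rfl
    | [x] => rfl
    | x :: y :: t => rw [hds] at hlen; simp at hlen
  | succ n ih =>
    intro k hk hn a
    by_cases hend : (ps.length : Int) - 1 ≤ k
    · rw [PySem.List.pyRange_one_eq_nil hend]
      have hlen : (ps.drop k.toNat).length ≤ 1 := by
        rw [List.length_drop]; omega
      match hds : ps.drop k.toNat with
      | [] => rfl
      | [x] => rfl
      | x :: y :: t => rw [hds] at hlen; simp at hlen
    · have hklt : k < (ps.length : Int) - 1 := by omega
      rw [PySem.List.pyRange_one_cons hklt, List.foldl_cons]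
      have hkl : k.toNat < ps.length := by omega
      have hinner :
          (PySem.List.pyRange (k + 1) ((ps.length : Int)) 1).foldl (fun ante j =>
            let v := PySem.List.pyGetD ps k 0
            let w := PySem.List.pyGetD ps j 0
            if ante.contains v then ante.insert v (ante.getD v [] ++ [w])
            else ante.insert v [w]) a
          = (ps.drop (k + 1).toNat).foldl (fun ante w =>
              if ante.contains (PySem.List.pyGetD ps k 0) then
                ante.insert (PySem.List.pyGetD ps k 0)
                  (ante.getD (PySem.List.pyGetD ps k 0) [] ++ [w])
              else ante.insert (PySem.List.pyGetD ps k 0) [w]) a :=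
        PySem.List.foldl_pyRange_pyGetD' ps 0
          (fun ante w =>
            if ante.contains (PySem.List.pyGetD ps k 0) then
              ante.insert (PySem.List.pyGetD ps k 0)
                (ante.getD (PySem.List.pyGetD ps k 0) [] ++ [w])
            else ante.insert (PySem.List.pyGetD ps k 0) [w]) a (by omega)
      rw [hinner, pvBatch]
      have hdrop1 : (k + 1).toNat = k.toNat + 1 := by omega
      have hne : ps.drop (k.toNat + 1) ≠ [] := by
        intro h
        have := congrArg List.length h
        rw [List.length_drop] at this
        simp at this; omega
      have hv : PySem.List.pyGetD ps k 0 = ps[k.toNat] :=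
        PySem.List.pyGetD_eq_getElem ps 0 hk (by omega)
      have hcons : ps.drop k.toNat = ps[k.toNat] :: ps.drop (k.toNat + 1) :=
        List.drop_eq_getElem_cons hkl
      rw [hdrop1]
      simp only [hne, if_false]
      rw [ih (k + 1) (by omega) (by omega), hdrop1, hcons]
      match hds : ps.drop (k.toNat + 1), hne with
      | w :: rest, _ =>
        simp only [pvBLoop, hv]

-- per patient: A's nested index loops equal B's shrinking-queue pass
theorem pvPat (a : PySem.Dict Int (List Int)) (ps : List Int) :
    (PySem.List.pyRange 0 ((ps.length : Int) - 1) 1).foldl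
      (fun ante i =>
        (PySem.List.pyRange (i + 1) (ps.length : Int) 1).foldl (fun ante j =>
          let v := PySem.List.pyGetD ps i 0
          let w := PySem.List.pyGetD ps j 0
          if ante.contains v then ante.insert v (ante.getD v [] ++ [w])
          else ante.insert v [w]) ante) a
      = pvBLoop a ps := by
  have := pvAux ps ps.length 0 le_rfl (by omega) a
  simpa using this

-- ===== VERDICT (by name: the statement is the Claim_ definition above) =====
theorem build_antecedent_index_spec : Claim_equal_build_antecedent_index := by
  intro pt_dict _
  unfold Spec_build_antecedent_index build_antecedent_index build_antecedent_index_alt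
  congr 1
  exact pvFoldlCongr pt_dict _ _ _
    (fun a kv => pvPat a (PySem.List.sorted kv.2 (fun x => x) true))
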